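-- pv_equiv track=rewrite | github.com/oscarahalvorsen/InclusivePipeline | python/decision_tree_voice.py | get_groupings
-- ===== SOURCE A (Python) =====
-- def get_groupings(seat_map):
--     """ Parses the seat map into groupings separated by empty rows. """
--     groupings = []
--     current_group = []
--     row_counter = 0  # Initialize counter for non-zero rows
--     for index, row in enumerate(seat_map):
--         if any(seat != 0 for seat in row):
--             row_counter += 1  # Increment for each non-zero row
--             empty_seat_count = sum(1 for element in row if element == 2)
--             current_group.append((row_counter, empty_seat_count, row))  # Store the row with the updated counter
--         else:
--             if current_group:
--                 groupings.append(current_group)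
--                 current_group = []
--     if current_group:
--         groupings.append(current_group)
--     return groupings
-- ===== SOURCE B (Python) =====
-- def get_groupings(seat_map):
--     """ Parses the seat map into groupings separated by empty rows. """
--     occupied = [(i, row) for i, row in enumerate(seat_map)
--                 if any(seat != 0 for seat in row)]
--     groups = {}
--     for rank, (i, row) in enumerate(occupied, 1):
--         empty_seat_count = sum(1 for element in row if element == 2)
--         # i - rank is constant exactly on a maximal run of consecutive occupied rows
--         groups.setdefault(i - rank, []).append((rank, empty_seat_count, row))
--     return list(groups.values())
-- ===== Notes on version B (the rewrite author's own statement) =====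
-- stated objective: alternative
-- what changed: Instead of A's buffer-and-flush run detection over all rows, B first filters the occupied rows with their indices, then buckets them into a dict keyed by the index-minus-rank invariant (constant exactly on a maximal run of consecutive occupied rows) and returns the dict's values; empty rows are never part of the grouping pass and no current-group buffer or flush exists.
import Mathlib
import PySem

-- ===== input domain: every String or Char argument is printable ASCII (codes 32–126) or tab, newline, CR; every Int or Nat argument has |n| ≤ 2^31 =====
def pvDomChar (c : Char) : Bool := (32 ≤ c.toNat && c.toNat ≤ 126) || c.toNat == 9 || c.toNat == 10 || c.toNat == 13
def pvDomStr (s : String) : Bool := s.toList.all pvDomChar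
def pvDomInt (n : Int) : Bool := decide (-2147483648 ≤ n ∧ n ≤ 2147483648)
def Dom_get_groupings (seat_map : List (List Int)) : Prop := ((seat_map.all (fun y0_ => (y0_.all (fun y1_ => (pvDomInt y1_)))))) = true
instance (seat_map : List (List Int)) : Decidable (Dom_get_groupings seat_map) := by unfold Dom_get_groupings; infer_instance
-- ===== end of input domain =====

-- B replaces A's buffer-and-flush run detection with: filter the occupied rows with
-- their indices, then bucket them into a dict keyed by index-minus-rank (constant
-- exactly on a maximal run of consecutive occupied rows); objective: alternative.

-- ===== PORT A =====
-- sum(1 for element in row if element == 2)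
def pvCount2A (row : List Int) : Int :=
  row.foldl (fun acc element => if element == 2 then acc + 1 else acc) 0

-- one iteration of A's for-loop over state (groupings, current_group, row_counter)
def pvStepA (st : List (List (Int × Int × List Int)) × List (Int × Int × List Int) × Int)
    (row : List Int) : List (List (Int × Int × List Int)) × List (Int × Int × List Int) × Int :=
  let groupings := st.1
  let current_group := st.2.1
  let row_counter := st.2.2
  if row.any (fun seat => seat != 0) then
    (groupings, current_group ++ [(row_counter + 1, pvCount2A row, row)], row_counter + 1)
  else
    if current_group ≠ [] then (groupings ++ [current_group], [], row_counter)
    else (groupings, current_group, row_counter)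

def get_groupings (seat_map : List (List Int)) : List (List (Int × Int × List Int)) :=
  let st := seat_map.foldl pvStepA ([], [], 0)
  if st.2.1 ≠ [] then st.1 ++ [st.2.1] else st.1

-- ===== PORT B =====
-- any(seat != 0 for seat in row)
def pvRowKeyB (row : List Int) : Bool := row.any (fun seat => seat != 0)

def get_groupings_alt (seat_map : List (List Int)) : List (List (Int × Int × List Int)) :=
  -- occupied = [(i, row) for i, row in enumerate(seat_map) if any(seat != 0 for seat in row)]
  let occupied := (PySem.List.enumerate seat_map).filter (fun p => pvRowKeyB p.2)
  -- for rank, (i, row) in enumerate(occupied, 1): groups.setdefault(i - rank, []).append(...)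
  let groups := (PySem.List.enumerate occupied 1).foldl
    (fun d q => d.modify (q.2.1 - q.1) []
      (fun v => v ++ [(q.1, pvCount2A q.2.2, q.2.2)]))
    PySem.Dict.empty
  groups.values

-- ===== PRECONDITION & SPEC =====
def Spec_get_groupings (seat_map : List (List Int)) (out : List (List (Int × Int × List Int))) : Prop := out = get_groupings_alt seat_map
instance (seat_map : List (List Int)) (out : List (List (Int × Int × List Int))) : Decidable (Spec_get_groupings seat_map out) := by unfold Spec_get_groupings; infer_instance

-- ===== CLAIM (what is proved, stated in full; the proofs are below) =====
def Claim_equal_get_groupings : Prop := ∀ (seat_map : List (List Int)), Dom_get_groupings seat_map → Spec_get_groupings seat_map (get_groupings seat_map)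

-- ===== LEMMAS AND PROOFS =====

-- proof-only recursive restatement of A's loop + final flush
def pvProcA (rc : Int) (cg : List (Int × Int × List Int)) (l : List (List Int)) :
    List (List (Int × Int × List Int)) :=
  match l with
  | [] => if cg ≠ [] then [cg] else []
  | r :: rs =>
    if pvRowKeyB r then pvProcA (rc + 1) (cg ++ [(rc + 1, pvCount2A r, r)]) rs
    else (if cg ≠ [] then [cg] else []) ++ pvProcA rc [] rs

theorem procA_eq_foldl (l : List (List Int))
    (g : List (List (Int × Int × List Int))) (cg : List (Int × Int × List Int)) (rc : Int) :
    (let st := l.foldl pvStepA (g, cg, rc)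
     if st.2.1 ≠ [] then st.1 ++ [st.2.1] else st.1) = g ++ pvProcA rc cg l := by
  induction l generalizing g cg rc with
  | nil => simp only [List.foldl_nil, pvProcA]; split_ifs <;> simp
  | cons r rs ih =>
    simp only [List.foldl_cons, pvProcA]
    by_cases hk : pvRowKeyB r = true
    · have hstep : pvStepA (g, cg, rc) r = (g, cg ++ [(rc + 1, pvCount2A r, r)], rc + 1) := by
        simp only [pvStepA]
        rw [show (r.any fun seat => seat != 0) = pvRowKeyB r from rfl, if_pos hk]
      rw [hstep, ih, if_pos hk]
    · have hstep : pvStepA (g, cg, rc) r =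
          (if cg ≠ [] then (g ++ [cg], [], rc) else (g, cg, rc)) := by
        simp only [pvStepA]
        rw [show (r.any fun seat => seat != 0) = pvRowKeyB r from rfl, if_neg hk]
      rw [hstep, if_neg hk]
      by_cases hcg : cg = []
      · subst hcg
        have e1 : (if ([] : List (Int × Int × List Int)) ≠ [] then (g ++ [[]], [], rc)
            else (g, ([] : List (Int × Int × List Int)), rc)) = (g, ([] : List (Int × Int × List Int)), rc) := by simp
        have e2 : (if ([] : List (Int × Int × List Int)) ≠ [] then [([] : List (Int × Int × List Int))] else [])
            = ([] : List (List (Int × Int × List Int))) := by simp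
        rw [e1, e2, ih]
        simp
      · have hcg' : cg ≠ [] := hcg
        have e1 : (if cg ≠ [] then (g ++ [cg], [], rc) else (g, cg, rc)) = (g ++ [cg], [], rc) := if_pos hcg'
        have e2 : (if cg ≠ [] then [cg] else []) = [cg] := if_pos hcg'
        rw [e1, e2, ih]
        simp

-- proof-only: B's filter over enumerate, with an explicit running index
def pvOcc (i : Int) (l : List (List Int)) : List (Int × List Int) :=
  match l with
  | [] => []
  | r :: rs => if pvRowKeyB r then (i, r) :: pvOcc (i + 1) rs else pvOcc (i + 1) rs

theorem occ_eq (l : List (List Int)) : ∀ (i : Int),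
    (PySem.List.enumerate l i).filter (fun p => pvRowKeyB p.2) = pvOcc i l := by
  induction l with
  | nil => intro i; simp [PySem.List.enumerate_nil, pvOcc]
  | cons r rs ih =>
    intro i
    rw [PySem.List.enumerate_cons, pvOcc, List.filter_cons]
    by_cases hk : pvRowKeyB r = true
    · rw [if_pos (by simpa using hk), if_pos hk, ih]
    · rw [if_neg (by simpa using hk), if_neg hk, ih]

-- proof-only: B's dict-filling loop, with an explicit running rank
def pvFill (d : PySem.Dict Int (List (Int × Int × List Int))) (rank : Int)
    (l : List (Int × List Int)) : PySem.Dict Int (List (Int × Int × List Int)) :=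
  match l with
  | [] => d
  | q :: rest =>
    pvFill (d.modify (q.1 - rank) [] (fun v => v ++ [(rank, pvCount2A q.2, q.2)])) (rank + 1) rest

theorem fold_eq_fill (l : List (Int × List Int)) :
    ∀ (d : PySem.Dict Int (List (Int × Int × List Int))) (s : Int),
    (PySem.List.enumerate l s).foldl
      (fun d q => d.modify (q.2.1 - q.1) [] (fun v => v ++ [(q.1, pvCount2A q.2.2, q.2.2)])) d
      = pvFill d s l := by
  induction l with
  | nil => intro d s; simp [PySem.List.enumerate_nil, pvFill]
  | cons q rest ih =>
    intro d s
    rw [PySem.List.enumerate_cons, List.foldl_cons, pvFill, ih]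

-- modify on a key absent from the dict appends a fresh entry
theorem modify_fresh {ν : Type} (d : PySem.Dict Int ν) (k : Int) (dflt : ν) (f : ν → ν)
    (h : ∀ p ∈ d.items, p.1 ≠ k) :
    (d.modify k dflt f).items = d.items ++ [(k, f dflt)] := by
  have hc : d.contains k = false := by
    simp only [PySem.Dict.contains, List.any_eq_false]
    intro p hp
    simpa using h p hp
  have hg : d.getD k dflt = dflt := by
    simp only [PySem.Dict.getD_eq_get?_getD, PySem.Dict.get?]
    rw [List.find?_eq_none.mpr (fun p hp => by simpa using h p hp)]
    rfl
  simp only [PySem.Dict.modify, hg, PySem.Dict.insert, hc]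
  simp

-- modify on the key of the LAST entry (absent earlier) rewrites that entry in place
theorem modify_last {ν : Type} (init : List (Int × ν)) (k : Int) (v : ν) (dflt : ν) (f : ν → ν)
    (h : ∀ p ∈ init, p.1 ≠ k) :
    ((PySem.Dict.mk (init ++ [(k, v)])).modify k dflt f).items = init ++ [(k, f v)] := by
  have hfind : (init ++ [(k, v)]).find? (fun p => p.1 == k) = some (k, v) := by
    rw [List.find?_append]
    have h1 : init.find? (fun p => p.1 == k) = none := by
      rw [List.find?_eq_none]
      intro p hp
      simpa using h p hp
    simp [h1]
  have hc : (PySem.Dict.mk (init ++ [(k, v)])).contains k = true := by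
    simp only [PySem.Dict.contains, List.any_eq_true]
    exact ⟨(k, v), by simp, by simp⟩
  have hg : (PySem.Dict.mk (init ++ [(k, v)])).getD k dflt = v := by
    simp only [PySem.Dict.getD_eq_get?_getD, PySem.Dict.get?, hfind, Option.map_some, Option.getD_some]
  simp only [PySem.Dict.modify, hg, PySem.Dict.insert, hc, if_pos]
  simp only [List.map_append]
  congr 1
  · conv_rhs => rw [← List.map_id init]
    apply List.map_congr_left
    intro p hp
    rw [if_neg (by simpa using h p hp)]
    rfl
  · simp

-- main invariant: filling the remaining occupied rows produces A's remaining groups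
theorem fill_eq_procA (l : List (List Int)) :
    ∀ (i rc : Int) (init : List (Int × List (Int × Int × List Int)))
      (cg : List (Int × Int × List Int)),
    (∀ p ∈ init, p.1 < i - rc - 1) →
    (pvFill (PySem.Dict.mk (init ++ if cg = [] then [] else [(i - rc - 1, cg)]))
        (rc + 1) (pvOcc i l)).values
      = init.map Prod.snd ++ pvProcA rc cg l := by
  induction l with
  | nil =>
    intro i rc init cg _
    by_cases hcg : cg = [] <;>
      simp [pvOcc, pvFill, pvProcA, hcg, PySem.Dict.values]
  | cons r rs ih =>
    intro i rc init cg hlt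
    rw [pvOcc, pvProcA]
    by_cases hk : pvRowKeyB r = true
    · rw [if_pos hk, if_pos hk, pvFill]
      have harith : i - (rc + 1) = i - rc - 1 := by ring
      by_cases hcg : cg = []
      · subst hcg
        have hfresh :
            ((PySem.Dict.mk (init ++ if ([] : List (Int × Int × List Int)) = [] then []
                else [(i - rc - 1, [])])).modify (i - (rc + 1)) []
              (fun v => v ++ [(rc + 1, pvCount2A r, r)])).items
            = init ++ [(i - rc - 1, [(rc + 1, pvCount2A r, r)])] := by
          rw [harith]
          have := modify_fresh (PySem.Dict.mk (init ++ [])) (i - rc - 1) []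
            (fun v => v ++ [(rc + 1, pvCount2A r, r)])
            (by intro p hp; exact ne_of_lt (hlt p (by simpa using hp)))
          simpa using this
        have hd : ((PySem.Dict.mk (init ++ if ([] : List (Int × Int × List Int)) = [] then []
                else [(i - rc - 1, [])])).modify (i - (rc + 1)) []
              (fun v => v ++ [(rc + 1, pvCount2A r, r)]))
            = PySem.Dict.mk (init ++ [(i - rc - 1, [(rc + 1, pvCount2A r, r)])]) :=
          PySem.Dict.ext hfresh
        rw [hd]
        have := ih (i + 1) (rc + 1) init [(rc + 1, pvCount2A r, r)]
          (by intro p hp; have := hlt p hp; omega)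
        rw [show i + 1 - (rc + 1) - 1 = i - rc - 1 by ring] at this
        simp only [List.cons_ne_nil, reduceIte] at this ⊢
        rw [show rc + 1 + 1 = rc + 2 by ring] at this ⊢
        rw [this]
        simp
      · have hset : (if cg = [] then ([] : List (Int × List (Int × Int × List Int)))
            else [(i - rc - 1, cg)]) = [(i - rc - 1, cg)] := if_neg hcg
        rw [hset]
        have hlast :
            ((PySem.Dict.mk (init ++ [(i - rc - 1, cg)])).modify (i - (rc + 1)) []
              (fun v => v ++ [(rc + 1, pvCount2A r, r)])).items
            = init ++ [(i - rc - 1, cg ++ [(rc + 1, pvCount2A r, r)])] := by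
          rw [harith]
          exact modify_last init (i - rc - 1) cg []
            (fun v => v ++ [(rc + 1, pvCount2A r, r)])
            (by intro p hp; exact ne_of_lt (hlt p hp))
        rw [PySem.Dict.ext hlast]
        have hne : cg ++ [(rc + 1, pvCount2A r, r)] ≠ [] := by simp
        have := ih (i + 1) (rc + 1) init (cg ++ [(rc + 1, pvCount2A r, r)])
          (by intro p hp; have := hlt p hp; omega)
        rw [show i + 1 - (rc + 1) - 1 = i - rc - 1 by ring, if_neg hne] at this
        rw [show rc + 1 + 1 = rc + 2 by ring] at this ⊢
        exact this
    · rw [if_neg hk, if_neg hk]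
      by_cases hcg : cg = []
      · subst hcg
        have := ih (i + 1) rc init []
          (by intro p hp; have := hlt p hp; omega)
        simp only [reduceIte] at this ⊢
        rw [this]
        simp
      · have hset : (if cg = [] then ([] : List (Int × List (Int × Int × List Int)))
            else [(i - rc - 1, cg)]) = [(i - rc - 1, cg)] := if_neg hcg
        rw [hset]
        have := ih (i + 1) rc (init ++ [(i - rc - 1, cg)]) []
          (by intro p hp
              rcases List.mem_append.mp hp with h | h
              · have := hlt p h; omega
              · simp at h; rw [h]; omega)
        simp only [reduceIte, List.append_nil] at this ⊢
        rw [this, if_pos hcg, List.map_append]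
        simp

-- ===== VERDICT (by name: the statement is the Claim_ definition above) =====
theorem get_groupings_spec : Claim_equal_get_groupings := by
  intro seat_map _
  unfold Spec_get_groupings
  have h := fill_eq_procA seat_map 0 0 [] [] (by intro p hp; simp at hp)
  simp only [reduceIte, List.append_nil, List.map_nil, List.nil_append] at h
  rw [show (0 : Int) + 1 = 1 from rfl] at h
  have hB : get_groupings_alt seat_map = pvProcA 0 [] seat_map := by
    simp only [get_groupings_alt, occ_eq, fold_eq_fill]
    exact h
  rw [hB]
  simpa [get_groupings] using procA_eq_foldl seat_map [] [] 0
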